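-- pv_equiv track=rewrite | github.com/chi-wei-fu-vi/fc32 | common/vi_scripts/ctypes2sv.py | hexnum
-- ===== SOURCE A (Python) =====
-- import string
--
-- def hexnum(num):
--   """
--   """
--   res_num=''
--   while True:
--     if '0x' not in num: break
--     idx=num.index('0x')
--     res_num+=num[:idx]
--     num=num[idx+2:]
--     idx=len(num)
--     for i,c in enumerate(num):
--       if c not in string.hexdigits:
--         idx=i
--         break
--     res_num+="%d'h"%(idx*4)
--     res_num+=num[:idx]
--     num=num[idx:]
--   return res_num+num
-- ===== SOURCE B (Python) =====
-- def hexnum(num):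
--   out = []
--   i = 0
--   n = len(num)
--   while i < n:
--     if num.startswith('0x', i):
--       j = i + 2
--       while j < n and num[j] in '0123456789abcdefABCDEF':
--         j += 1
--       run = num[i + 2:j]
--       out.append("%d'h%s" % (len(run) * 4, run))
--       i = j
--     else:
--       out.append(num[i])
--       i += 1
--   return ''.join(out)
-- ===== Notes on version B (the rewrite author's own statement) =====
-- stated objective: alternative
-- what changed: Replaced A's repeated substring search plus slice-and-reassign loop with a single left-to-right index scan that emits pieces into a list joined once.
import Mathlib
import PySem

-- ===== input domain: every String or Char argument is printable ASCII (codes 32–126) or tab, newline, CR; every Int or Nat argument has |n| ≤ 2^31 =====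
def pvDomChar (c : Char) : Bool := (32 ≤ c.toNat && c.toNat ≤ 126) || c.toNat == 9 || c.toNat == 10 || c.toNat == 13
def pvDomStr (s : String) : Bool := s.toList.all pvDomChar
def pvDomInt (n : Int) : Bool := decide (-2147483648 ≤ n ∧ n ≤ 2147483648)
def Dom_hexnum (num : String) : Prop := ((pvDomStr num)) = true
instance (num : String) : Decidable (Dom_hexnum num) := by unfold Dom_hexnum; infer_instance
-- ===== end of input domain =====

-- B replaces A's repeated substring-search / slice-and-reassign loop with a single left-to-right scan that emits pieces and joins once (alternative decomposition).

-- string.hexdigits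
def hexDigits : List Char := "0123456789abcdefABCDEF".toList

-- ===== PORT A =====
-- idx=len(num); for i,c in enumerate(num): if c not in string.hexdigits: idx=i; break
def forIdxA : List Char → Nat → Nat → Nat
  | [], _, len => len
  | c :: rest, i, len => if !(hexDigits.contains c) then i else forIdxA rest (i + 1) len

-- A's while-loop; the slices num[:idx] / num[idx+2:] / num[:idx2] / num[idx2:] are take/drop (exact: all indices are nonnegative here)
def hexnumLoopA (res num : List Char) : List Char :=
  if h : PySem.Chars.isIn ['0', 'x'] num then          -- if '0x' not in num: break
    let idx : Nat := (PySem.Chars.find num ['0', 'x']).toNat   -- num.index('0x'); guarded, so find ≥ 0 (no ValueError)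
    let res1 := res ++ num.take idx                    -- res_num += num[:idx]
    let num1 := num.drop (idx + 2)                     -- num = num[idx+2:]
    let idx2 := forIdxA num1 0 num1.length             -- the for/enumerate/break loop
    let res2 := res1 ++ PySem.Int.toChars ((idx2 : Int) * 4) ++ ['\'', 'h'] ++ num1.take idx2  -- "%d'h"%(idx*4); num[:idx]
    hexnumLoopA res2 (num1.drop idx2)                  -- num = num[idx:]
  else res ++ num
termination_by num.length
decreasing_by
  have h2 : (2 : Nat) ≤ num.length := by
    obtain ⟨s, t, hst⟩ := (PySem.Chars.isIn_iff_infix (sub := ['0','x']) (s := num)).mp h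
    have := congrArg List.length hst
    simp at this
    omega
  simp [List.length_drop]
  omega

def hexnum (num : String) : String := String.ofList (hexnumLoopA [] num.toList)

-- ===== PORT B =====
def isHexB (c : Char) : Bool := hexDigits.contains c   -- num[j] in '0123456789abcdefABCDEF'

-- B's single scan (the while i < n loop): startswith '0x' at i → emit "%d'h"+run past the hex run, else copy one char
def scanB : List Char → List Char
  | [] => []
  | '0' :: 'x' :: rest =>
      let run := rest.takeWhile isHexB
      PySem.Int.toChars ((run.length : Int) * 4) ++ '\'' :: 'h' :: (run ++ scanB (rest.dropWhile isHexB))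
  | c :: rest => c :: scanB rest
termination_by cs => cs.length
decreasing_by
  · have := List.length_dropWhile_le isHexB rest; simp; omega
  · simp

def hexnum_alt (num : String) : String := String.ofList (scanB num.toList)

-- ===== PRECONDITION & SPEC =====
def Spec_hexnum (num : String) (out : String) : Prop := out = hexnum_alt num
instance (num : String) (out : String) : Decidable (Spec_hexnum num out) := by unfold Spec_hexnum; infer_instance

-- ===== CLAIM (what is proved, stated in full; the proofs are below) =====
def Claim_equal_hexnum : Prop := ∀ (num : String), Dom_hexnum num → Spec_hexnum num (hexnum num)

-- ===== LEMMAS AND PROOFS =====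

-- scanB on a char that does not start '0x' just copies it
theorem scanB_cons (c : Char) (rest : List Char)
    (h : ¬ (c = '0' ∧ ∃ t, rest = 'x' :: t)) : scanB (c :: rest) = c :: scanB rest := by
  rw [scanB.eq_def]
  split
  · rename_i heq; cases heq
  · rename_i heq
    injection heq with h1 h2
    exact absurd ⟨h1, _, h2⟩ h
  · rename_i heq; injection heq with h1 h2; subst h1; subst h2; rfl

theorem scanB_zero_x (rest : List Char) :
    scanB ('0' :: 'x' :: rest) =
      PySem.Int.toChars (((rest.takeWhile isHexB).length : Int) * 4) ++
        '\'' :: 'h' :: (rest.takeWhile isHexB ++ scanB (rest.dropWhile isHexB)) := by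
  simp [scanB]

-- a string without '0x' is copied unchanged
theorem scanB_of_not_infix (cs : List Char) (h : ¬ ['0','x'] <:+: cs) : scanB cs = cs := by
  induction cs with
  | nil => simp [scanB]
  | cons c rest ih =>
    have hcons : ¬ (c = '0' ∧ ∃ t, rest = 'x' :: t) := by
      rintro ⟨rfl, t, rfl⟩
      exact h ⟨[], t, by simp⟩
    rw [scanB_cons c rest hcons,
      ih (fun hr => h (by obtain ⟨s, t, hst⟩ := hr; exact ⟨c :: s, t, by simp [hst]⟩))]

-- A's inner for/break loop computes the length of the hex run
theorem forIdxA_spec (cs : List Char) (i : Nat) :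
    forIdxA cs i (i + cs.length) = i + (cs.takeWhile isHexB).length := by
  induction cs generalizing i with
  | nil => simp [forIdxA]
  | cons c rest ih =>
    by_cases hc : hexDigits.contains c
    · simp only [forIdxA, List.takeWhile_cons, isHexB, hc, Bool.not_true, Bool.false_eq_true,
        if_false, if_true, List.length_cons]
      rw [show i + (rest.length + 1) = (i + 1) + rest.length by omega, ih (i + 1)]
      omega
    · have hm : ¬ c ∈ hexDigits := by simpa using hc
      simp [forIdxA, isHexB, hm]

-- scanB copies a prefix that contains no occurrence of '0x'
theorem scanB_append (pre tail : List Char)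
    (h : ∀ i, i < pre.length → ¬ ['0','x'] <+: (pre ++ tail).drop i) :
    scanB (pre ++ tail) = pre ++ scanB tail := by
  induction pre generalizing tail with
  | nil => simp
  | cons c pre' ih =>
    have h0 := h 0 (by simp)
    have hcons : ¬ (c = '0' ∧ ∃ t, pre' ++ tail = 'x' :: t) := by
      rintro ⟨rfl, t, ht⟩
      exact h0 (by simp [ht, List.prefix_iff_eq_take])
    rw [List.cons_append, scanB_cons c _ hcons, ih tail (fun i hi => by
      have := h (i + 1) (by simpa using Nat.succ_lt_succ hi)
      simpa using this)]
    simp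

-- main invariant: A's accumulator loop equals res ++ scanB num
theorem loopA_eq (n : Nat) (num res : List Char) (hn : num.length ≤ n) :
    hexnumLoopA res num = res ++ scanB num := by
  induction n generalizing num res with
  | zero =>
    have : num = [] := List.eq_nil_of_length_eq_zero (by omega)
    subst this
    rw [hexnumLoopA, dif_neg (by decide)]
    simp [scanB]
  | succ n ih =>
    rw [hexnumLoopA]
    by_cases hin : PySem.Chars.isIn ['0','x'] num
    · rw [dif_pos hin]
      dsimp only
      have hnn : (0 : Int) ≤ PySem.Chars.find num ['0','x'] :=
        (PySem.Chars.find_nonneg_iff _ _).mpr ((PySem.Chars.isIn_iff_infix _ _).mp hin)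
      have hkle : (PySem.Chars.find num ['0','x']).toNat ≤ num.length := by
        have := PySem.Chars.find_le_length (s := num) (sub := ['0','x'])
        omega
      set k : Nat := (PySem.Chars.find num ['0','x']).toNat with hk
      obtain ⟨hpre, hmin⟩ := PySem.Chars.find_spec (s := num) (sub := ['0','x']) hnn
      obtain ⟨t, ht⟩ := hpre
      have hdk : num.drop k = '0' :: 'x' :: t := by rw [← ht]; rfl
      have hnum : num = num.take k ++ '0' :: 'x' :: t := by
        conv_lhs => rw [← List.take_append_drop k num, hdk]
      have hdrop2 : num.drop (k + 2) = t := by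
        rw [← List.drop_drop, hdk]
        rfl
      rw [hdrop2]
      have hidx2 : forIdxA t 0 t.length = (t.takeWhile isHexB).length := by
        simpa using forIdxA_spec t 0
      rw [hidx2]
      obtain ⟨s2, hs2⟩ := List.takeWhile_prefix (l := t) (p := isHexB)
      have htake : t.take (t.takeWhile isHexB).length = t.takeWhile isHexB :=
        (List.prefix_iff_eq_take.mp ⟨s2, hs2⟩).symm
      have htd := List.take_append_drop (t.takeWhile isHexB).length t
      rw [htake] at htd
      have hdropw : t.drop (t.takeWhile isHexB).length = t.dropWhile isHexB :=
        List.append_cancel_left (by rw [htd, List.takeWhile_append_dropWhile])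
      rw [htake, hdropw]
      have hlen : (t.dropWhile isHexB).length ≤ n := by
        have h1 := List.length_dropWhile_le isHexB t
        have h2 := congrArg List.length hnum
        simp [List.length_take, Nat.min_eq_left hkle] at h2
        omega
      rw [ih _ _ hlen]
      have hscan : scanB num = num.take k ++ scanB ('0' :: 'x' :: t) := by
        conv_lhs => rw [hnum]
        refine scanB_append _ _ ?_
        intro i hi
        rw [← hnum]
        have hki : i < k := by
          simpa [List.length_take, Nat.min_eq_left hkle] using hi
        exact hmin i hki
      rw [hscan, scanB_zero_x]
      simp
    · rw [dif_neg hin]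
      rw [scanB_of_not_infix num (by
        intro hinf
        exact hin ((PySem.Chars.isIn_iff_infix _ _).mpr hinf))]

-- ===== VERDICT (by name: the statement is the Claim_ definition above) =====
theorem hexnum_spec : Claim_equal_hexnum := by
  intro num _
  unfold Spec_hexnum hexnum hexnum_alt
  rw [loopA_eq num.toList.length _ _ le_rfl]
  simp
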